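-- pv_equiv track=rewrite | github.com/ouharu/code-practice | paiza/A066.py | max_consecutive_workdays
-- ===== SOURCE A (Python) =====
-- def max_consecutive_workdays(intervals):
--     current_end = intervals[0][1]
--     current_consecutive_workdays = current_end - intervals[0][0] + 1
--     max_workdays = current_consecutive_workdays
--
--     for start, end in intervals[1:]:
--         if start > current_end + 1:
--             # 不连续
--             current_consecutive_workdays = end - start + 1
--             current_end = end
--         else:
--             # 连续，判断包含关系
--             if end >= current_end:
--                 current_consecutive_workdays += end - current_end
--                 current_end = end
--         max_workdays = max(max_workdays, current_consecutive_workdays)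
--
--     return max_workdays
-- ===== SOURCE B (Python) =====
-- def max_consecutive_workdays(intervals):
--     # Build the merged segments explicitly, then take the longest one.
--     segs = [(intervals[0][0], intervals[0][1])]
--     for start, end in intervals[1:]:
--         last_start, last_end = segs[-1]
--         if start > last_end + 1:
--             segs.append((start, end))
--         elif end >= last_end:
--             segs[-1] = (last_start, end)
--     return max(e - s + 1 for s, e in segs)
-- ===== Notes on version B (the rewrite author's own statement) =====
-- stated objective: simpler
-- what changed: B first builds the explicit list of merged segments and then returns the maximum segment length in a separate pass, instead of A's single pass threading a running segment length and running maximum through the loop.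
import Mathlib
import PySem

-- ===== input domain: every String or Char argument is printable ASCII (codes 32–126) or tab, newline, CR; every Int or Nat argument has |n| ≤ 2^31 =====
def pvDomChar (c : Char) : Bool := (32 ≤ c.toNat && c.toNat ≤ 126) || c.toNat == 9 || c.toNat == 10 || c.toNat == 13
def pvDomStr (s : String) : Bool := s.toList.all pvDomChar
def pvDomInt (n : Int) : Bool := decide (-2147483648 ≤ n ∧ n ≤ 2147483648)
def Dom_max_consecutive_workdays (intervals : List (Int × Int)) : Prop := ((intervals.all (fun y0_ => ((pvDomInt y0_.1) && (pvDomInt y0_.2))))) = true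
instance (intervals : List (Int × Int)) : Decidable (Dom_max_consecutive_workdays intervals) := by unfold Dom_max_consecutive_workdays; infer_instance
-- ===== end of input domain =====

-- B builds the explicit merged-segment list and then takes the longest segment, instead of
-- A's single fused pass; same O(n) cost, separated concerns.

-- ===== PORT A =====
-- state = (current_end, current_consecutive_workdays, max_workdays)
def pvStepA (st : Int × Int × Int) (p : Int × Int) : Int × Int × Int :=
  if p.1 > st.1 + 1 then
    (p.2, p.2 - p.1 + 1, max st.2.2 (p.2 - p.1 + 1))
  else if p.2 ≥ st.1 then
    (p.2, st.2.1 + (p.2 - st.1), max st.2.2 (st.2.1 + (p.2 - st.1)))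
  else
    (st.1, st.2.1, max st.2.2 st.2.1)

def max_consecutive_workdays (intervals : List (Int × Int)) : Int :=
  match intervals with
  | [] => 0  -- Python raises IndexError here; excluded by Pre_
  | (s0, e0) :: rest =>
    (rest.foldl pvStepA (e0, e0 - s0 + 1, e0 - s0 + 1)).2.2

-- ===== PORT B =====
-- segments kept with the most recent one at the head (Python's segs[-1])
def pvStepB (acc : List (Int × Int)) (p : Int × Int) : List (Int × Int) :=
  match acc with
  | [] => []  -- unreachable: acc is seeded non-empty
  | (ls, le) :: t =>
    if p.1 > le + 1 then (p.1, p.2) :: (ls, le) :: t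
    else if p.2 ≥ le then (ls, p.2) :: t
    else (ls, le) :: t

def pvSegLen (q : Int × Int) : Int := q.2 - q.1 + 1

-- max(e - s + 1 for s, e in segs); order of the fold does not change the maximum
def pvMaxSegLen : List (Int × Int) → Int
  | [] => 0  -- unreachable for B: segs is non-empty
  | x :: t => t.foldl (fun m q => max m (pvSegLen q)) (pvSegLen x)

def max_consecutive_workdays_alt (intervals : List (Int × Int)) : Int :=
  match intervals with
  | [] => 0  -- Python raises ValueError/IndexError here; excluded by Pre_
  | (s0, e0) :: rest =>
    pvMaxSegLen (rest.foldl pvStepB [(s0, e0)])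

-- ===== PRECONDITION & SPEC =====
-- Pre_ excludes only the empty list, on which Python A raises IndexError.
def Pre_max_consecutive_workdays (intervals : List (Int × Int)) : Prop := intervals ≠ []
instance (intervals : List (Int × Int)) : Decidable (Pre_max_consecutive_workdays intervals) := by unfold Pre_max_consecutive_workdays; infer_instance
def pvWitness_max_consecutive_workdays : (List (Int × Int)) := [(1, 3), (5, 7)]

def Spec_max_consecutive_workdays (intervals : List (Int × Int)) (out : Int) : Prop := out = max_consecutive_workdays_alt intervals
instance (intervals : List (Int × Int)) (out : Int) : Decidable (Spec_max_consecutive_workdays intervals out) := by unfold Spec_max_consecutive_workdays; infer_instance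

-- ===== CLAIM (what is proved, stated in full; the proofs are below) =====
def Claim_equal_max_consecutive_workdays : Prop := ∀ (intervals : List (Int × Int)), Dom_max_consecutive_workdays intervals → Pre_max_consecutive_workdays intervals → Spec_max_consecutive_workdays intervals (max_consecutive_workdays intervals)

-- ===== LEMMAS AND PROOFS =====

-- fold of max distributes over a max in the initial value
theorem pv_foldl_max_init (t : List (Int × Int)) (a b : Int) :
    t.foldl (fun m q => max m (pvSegLen q)) (max a b)
      = max a (t.foldl (fun m q => max m (pvSegLen q)) b) := by
  induction t generalizing b with
  | nil => rfl
  | cons q t ih =>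
    simp only [List.foldl_cons]
    rw [max_assoc, ih]

theorem pv_maxSegLen_cons (n x : Int × Int) (t : List (Int × Int)) :
    pvMaxSegLen (n :: x :: t) = max (pvSegLen n) (pvMaxSegLen (x :: t)) := by
  simp only [pvMaxSegLen, List.foldl_cons]
  rw [show max (pvSegLen n) (pvSegLen x) = max (pvSegLen n) (pvSegLen x) from rfl,
      pv_foldl_max_init]

theorem pv_maxSegLen_head_le (x : Int × Int) (t : List (Int × Int)) :
    pvSegLen x ≤ pvMaxSegLen (x :: t) := by
  have h : pvMaxSegLen (x :: t) = t.foldl (fun m q => max m (pvSegLen q)) (max (pvSegLen x) (pvSegLen x)) := by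
    simp [pvMaxSegLen]
  rw [h, pv_foldl_max_init]
  exact le_max_left _ _

theorem pv_maxSegLen_grow (ls le e' : Int) (t : List (Int × Int)) (h : le ≤ e') :
    pvMaxSegLen ((ls, e') :: t) = max (pvSegLen (ls, e')) (pvMaxSegLen ((ls, le) :: t)) := by
  have hlen : pvSegLen (ls, le) ≤ pvSegLen (ls, e') := by simp [pvSegLen]; omega
  have : pvSegLen (ls, e') = max (pvSegLen (ls, e')) (pvSegLen (ls, le)) :=
    (max_eq_left hlen).symm
  calc pvMaxSegLen ((ls, e') :: t)
      = t.foldl (fun m q => max m (pvSegLen q)) (max (pvSegLen (ls, e')) (pvSegLen (ls, le))) := by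
        simp only [pvMaxSegLen]; rw [← this]
    _ = max (pvSegLen (ls, e')) (t.foldl (fun m q => max m (pvSegLen q)) (pvSegLen (ls, le))) :=
        pv_foldl_max_init ..
    _ = max (pvSegLen (ls, e')) (pvMaxSegLen ((ls, le) :: t)) := rfl

-- main invariant: A's fold state corresponds to B's segment list
theorem pv_key (rest : List (Int × Int)) :
    ∀ (ce cc mw ls : Int) (t : List (Int × Int)),
      cc = ce - ls + 1 →
      mw = pvMaxSegLen ((ls, ce) :: t) →
      (rest.foldl pvStepA (ce, cc, mw)).2.2
        = pvMaxSegLen (rest.foldl pvStepB ((ls, ce) :: t)) := by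
  induction rest with
  | nil =>
    intro ce cc mw ls t hcc hmw
    simpa using hmw
  | cons p rest ih =>
    intro ce cc mw ls t hcc hmw
    simp only [List.foldl_cons, pvStepA, pvStepB]
    by_cases h1 : p.1 > ce + 1
    · simp only [if_pos h1]
      apply ih
      · rfl
      · rw [pv_maxSegLen_cons, hmw, max_comm]
        rfl
    · simp only [if_neg h1]
      by_cases h2 : p.2 ≥ ce
      · simp only [if_pos h2]
        apply ih
        · omega
        · rw [pv_maxSegLen_grow ls ce p.2 t h2, hmw, hcc]
          have : pvSegLen (ls, p.2) = ce - ls + 1 + (p.2 - ce) := by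
            simp [pvSegLen]; omega
          rw [this, max_comm]
      · simp only [if_neg h2]
        apply ih
        · exact hcc
        · rw [hmw, hcc]
          have : pvSegLen (ls, ce) = ce - ls + 1 := by simp [pvSegLen]
          rw [← this, max_eq_left (pv_maxSegLen_head_le _ _)]

-- ===== VERDICT (by name: the statement is the Claim_ definition above) =====
theorem max_consecutive_workdays_spec : Claim_equal_max_consecutive_workdays := by
  intro intervals _ hpre
  match intervals with
  | [] => exact absurd rfl hpre
  | (s0, e0) :: rest =>
    show (rest.foldl pvStepA (e0, e0 - s0 + 1, e0 - s0 + 1)).2.2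
        = pvMaxSegLen (rest.foldl pvStepB [(s0, e0)])
    exact pv_key rest e0 _ _ s0 [] rfl rfl
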